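-- pv_equiv track=rewrite | github.com/aisspr/leetcode | code_signal/CS.py | solution
-- ===== SOURCE A (Python) =====
-- def solution(numbers):
--     """
--     Return array where 1 indicates element is greater than both neighbors
--     """
--     result = []
--     for i in range(len(numbers)):
--         is_peak = True
--         if i > 0 and numbers[i] <= numbers[i-1]:
--             is_peak = False
--         if i < len(numbers)-1 and numbers[i] <= numbers[i+1]:
--             is_peak = False
--         result.append(1 if is_peak else 0)
--     return result
-- ===== SOURCE B (Python) =====
-- def solution(numbers):
--     """
--     Return array where 1 indicates element is greater than both neighbors
--     """
--     if not numbers: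
--         return []
--     adj = list(zip(numbers, numbers[1:]))
--     gt_prev = [True] + [b > a for a, b in adj]
--     gt_next = [a > b for a, b in adj] + [True]
--     return [int(l and r) for l, r in zip(gt_prev, gt_next)]
-- ===== Notes on version B (the rewrite author's own statement) =====
-- stated objective: alternative
-- what changed: B computes the adjacent-pair comparisons once as two boolean arrays (greater-than-previous / greater-than-next, padded with True at the ends) and zips them, instead of A's index loop with boundary if-branches.
import Mathlib
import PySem

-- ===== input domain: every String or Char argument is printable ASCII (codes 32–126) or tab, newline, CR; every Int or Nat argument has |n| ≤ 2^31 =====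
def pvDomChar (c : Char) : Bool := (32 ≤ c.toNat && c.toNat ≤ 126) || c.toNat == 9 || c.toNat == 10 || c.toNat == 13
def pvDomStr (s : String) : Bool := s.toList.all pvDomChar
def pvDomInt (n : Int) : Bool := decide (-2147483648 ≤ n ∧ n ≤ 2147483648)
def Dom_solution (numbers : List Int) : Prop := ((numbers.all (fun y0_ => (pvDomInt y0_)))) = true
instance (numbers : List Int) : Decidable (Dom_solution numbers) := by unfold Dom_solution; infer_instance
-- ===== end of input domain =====

-- B replaces A's index loop with boundary if-branches by two padded adjacent-comparison
-- boolean lists that are zipped together (objective: alternative decomposition, same cost).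

-- ===== PORT A =====
-- loop body of A; every index numbers[i], numbers[i-1], numbers[i+1] is guarded in range, so getD is exact here
def peakVal (numbers : List Int) (i : Nat) : Int :=
  let isPeak := true
  let isPeak := if i > 0 && decide (numbers.getD i 0 ≤ numbers.getD (i-1) 0) then false else isPeak
  let isPeak := if i < numbers.length - 1 && decide (numbers.getD i 0 ≤ numbers.getD (i+1) 0) then false else isPeak
  if isPeak then 1 else 0

def solution (numbers : List Int) : List Int :=
  (List.range numbers.length).foldl (fun result i => result ++ [peakVal numbers i]) []

-- ===== PORT B =====
def solution_alt (numbers : List Int) : List Int :=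
  if numbers.isEmpty then []
  else
    let adj := numbers.zip (numbers.drop 1)    -- zip(numbers, numbers[1:])
    let gtPrev := true :: adj.map (fun p => decide (p.2 > p.1))
    let gtNext := adj.map (fun p => decide (p.1 > p.2)) ++ [true]
    (gtPrev.zip gtNext).map (fun p => if p.1 && p.2 then (1:Int) else 0)

-- ===== PRECONDITION & SPEC =====
def Spec_solution (numbers : List Int) (out : List Int) : Prop := out = solution_alt numbers
instance (numbers : List Int) (out : List Int) : Decidable (Spec_solution numbers out) := by unfold Spec_solution; infer_instance

-- ===== CLAIM (what is proved, stated in full; the proofs are below) =====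
def Claim_equal_solution : Prop := ∀ (numbers : List Int), Dom_solution numbers → Spec_solution numbers (solution numbers)

-- ===== LEMMAS AND PROOFS =====

theorem solution_eq_map (numbers : List Int) :
    solution numbers = (List.range numbers.length).map (peakVal numbers) := by
  unfold solution
  rw [PySem.List.foldl_append_singleton_eq_map]
  simp

theorem solution_len (numbers : List Int) : (solution numbers).length = numbers.length := by
  rw [solution_eq_map]; simp

theorem solution_alt_len (numbers : List Int) : (solution_alt numbers).length = numbers.length := by
  rcases numbers with _ | ⟨a, rest⟩
  · simp [solution_alt]
  · simp [solution_alt]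

theorem main_eq (numbers : List Int) : solution numbers = solution_alt numbers := by
  rcases hn : numbers with _ | ⟨a, rest⟩
  · simp [solution, solution_alt]
  · rw [← hn]
    have hne : numbers.isEmpty = false := by subst hn; simp
    have hlen1 : 1 ≤ numbers.length := by subst hn; simp
    apply List.ext_getElem
    · rw [solution_len, solution_alt_len]
    · intro i hi _
      have h : i < numbers.length := by rwa [solution_len] at hi
      rw [List.getElem_of_eq (solution_eq_map numbers)]
      rw [List.getElem_map, List.getElem_range]
      simp only [solution_alt, hne, Bool.false_eq_true, if_false]
      rw [List.getElem_map, List.getElem_zip]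
      have hlenz : (numbers.zip (numbers.drop 1)).length = numbers.length - 1 := by
        simp
      have hbp : i < (true :: (numbers.zip (numbers.drop 1)).map (fun p => decide (p.2 > p.1))).length := by
        simp; omega
      have hbn : i < ((numbers.zip (numbers.drop 1)).map (fun p => decide (p.1 > p.2)) ++ [true]).length := by
        simp; omega
      -- gtPrev entry
      have hprev : (true :: (numbers.zip (numbers.drop 1)).map (fun p => decide (p.2 > p.1)))[i]'hbp =
          if 0 < i then decide (numbers.getD (i-1) 0 < numbers[i]'h) else true := by
        rcases i with _ | j
        · simp
        · simp only [List.getElem_cons_succ, List.getElem_map, List.getElem_zip,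
            List.getElem_drop]
          have h1j : 1 + j = j + 1 := by omega
          simp only [h1j, Nat.add_sub_cancel, List.getD_eq_getElem?_getD,
            List.getElem?_eq_getElem (show j < numbers.length by omega), Option.getD_some]
          simp
      -- gtNext entry
      have hnext : ((numbers.zip (numbers.drop 1)).map (fun p => decide (p.1 > p.2)) ++ [true])[i]'hbn =
          if i < numbers.length - 1 then decide (numbers.getD (i+1) 0 < numbers[i]'h) else true := by
        by_cases hlt : i < numbers.length - 1
        · rw [List.getElem_append_left (by simp; omega)]
          simp only [List.getElem_map, List.getElem_zip, List.getElem_drop]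
          have h1i : 1 + i = i + 1 := by omega
          simp only [h1i, hlt, if_true, List.getD_eq_getElem?_getD,
            List.getElem?_eq_getElem (show i + 1 < numbers.length by omega), Option.getD_some]
        · rw [List.getElem_append_right (by simp; omega)]
          simp [hlt]
      rw [hprev, hnext]
      unfold peakVal
      have hgd : numbers.getD i 0 = numbers[i]'h := List.getD_eq_getElem _ _ h
      rw [hgd]
      simp only [List.getD_eq_getElem?_getD] at hprev hnext ⊢
      by_cases hpos : 0 < i <;> by_cases hlt : i < numbers.length - 1
      · simp only [hpos, hlt, decide_true, Bool.true_and, if_true]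
        by_cases h1 : numbers[i]'h ≤ (numbers[i-1]?).getD 0 <;>
          by_cases h2 : numbers[i]'h ≤ (numbers[i+1]?).getD 0 <;>
          simp [h1, h2, not_le.mp, le_of_lt]
      · simp only [hpos, hlt, decide_true, decide_false, Bool.true_and, Bool.false_and,
          if_true, if_false, Bool.and_true]
        by_cases h1 : numbers[i]'h ≤ (numbers[i-1]?).getD 0 <;> simp [h1, not_le.mp]
      · simp only [hpos, hlt, decide_true, decide_false, Bool.true_and, Bool.false_and,
          if_true, if_false, Bool.true_and]
        by_cases h2 : numbers[i]'h ≤ (numbers[i+1]?).getD 0 <;> simp [h2, not_le.mp]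
      · simp [hpos, hlt]

-- ===== VERDICT (by name: the statement is the Claim_ definition above) =====
theorem solution_spec : Claim_equal_solution := by
  intro numbers _
  unfold Spec_solution
  exact main_eq numbers
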